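-- pv_equiv track=rewrite | github.com/edoh-Onuh/edoh-onuh | ETL-Project/etl_script.py | transform_customers
-- ===== SOURCE A (Python) =====
-- def transform_customers(csv_data, json_data):
--     customers = {}
--     for c in csv_data + json_data:
--         name = f"{c.get('first_name', '')} {c.get('last_name', '')}".strip() or c.get('company_name', '')
--         if not name: continue
--         key = name.strip()
--         customers.setdefault(key, {
--             'name': key,
--             'first_name': c.get('first_name', ''),
--             'last_name': c.get('last_name', ''),
--             'company_name': c.get('company_name', ''),
--             'customer_type': c.get('customer_type', ''),
--             'subscription_type': c.get('subscription_type', ''),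
--             'email': c.get('email'),
--             'phone_number': c.get('phone_number', ''),
--             'dob': c.get('dob', ''),
--             'sex': c.get('sex', '')
--         }).update(c)
--     return list(customers.values())
-- ===== SOURCE B (Python) =====
-- _DEFAULTED_FIELDS = (
--     ('first_name', ''), ('last_name', ''), ('company_name', ''),
--     ('customer_type', ''), ('subscription_type', ''), ('email', None),
--     ('phone_number', ''), ('dob', ''), ('sex', ''),
-- )
--
--
-- def _key(c):
--     full = f"{c.get('first_name', '')} {c.get('last_name', '')}".strip()
--     name = full or c.get('company_name', '')
--     return name.strip() if name else None
--
--
-- def _template(key, c):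
--     t = {'name': key}
--     t.update((f, c.get(f, d)) for f, d in _DEFAULTED_FIELDS)
--     return t
--
--
-- def transform_customers(csv_data, json_data):
--     # pass 1: group the records by their name key, in arrival order
--     groups = {}
--     for c in csv_data + json_data:
--         key = _key(c)
--         if key is None:
--             continue
--         groups.setdefault(key, []).append(c)
--     # pass 2: fold each group onto the template built from its first record
--     result = []
--     for key, recs in groups.items():
--         merged = _template(key, recs[0])
--         for c in recs:
--             merged.update(c)
--         result.append(merged)
--     return result
-- ===== Notes on version B (the rewrite author's own statement) =====
-- stated objective: alternative
-- what changed: B replaces A's single pass that merges each record into a dict of accumulated customer dicts by a two-pass group-then-fold: first group the records by their name key into lists in arrival order, then build each output record by folding dict.update over the group starting from a template taken from the group's first record.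
import Mathlib
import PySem

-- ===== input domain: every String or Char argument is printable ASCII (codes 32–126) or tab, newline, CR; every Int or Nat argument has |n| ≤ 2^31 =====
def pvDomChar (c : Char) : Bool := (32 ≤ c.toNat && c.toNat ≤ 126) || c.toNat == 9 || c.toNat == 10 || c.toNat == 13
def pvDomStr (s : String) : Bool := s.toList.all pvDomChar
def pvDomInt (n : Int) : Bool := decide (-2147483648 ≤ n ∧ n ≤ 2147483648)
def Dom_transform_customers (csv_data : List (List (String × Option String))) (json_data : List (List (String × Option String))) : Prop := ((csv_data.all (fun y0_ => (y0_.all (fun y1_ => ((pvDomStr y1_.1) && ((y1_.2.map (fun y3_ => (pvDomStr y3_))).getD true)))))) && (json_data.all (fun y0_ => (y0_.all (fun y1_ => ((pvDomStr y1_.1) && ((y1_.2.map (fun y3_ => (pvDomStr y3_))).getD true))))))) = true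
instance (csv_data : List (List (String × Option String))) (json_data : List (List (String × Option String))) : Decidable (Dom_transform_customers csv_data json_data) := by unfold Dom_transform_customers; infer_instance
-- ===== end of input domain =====

-- B: same merge/dedup by name key as A, decomposed as group-then-fold instead of A's single
-- merging pass (objective: alternative decomposition); return values proved equal.

-- shared helper: both Pythons compute the record's name key (None = skip) the same way
-- c.get(k, d): first-match lookup in the record (a Python dict)
def pvGet (c : List (String × Option String)) (k : String) (d : Option String) : Option String :=
  ((PySem.Dict.mk c).get? k).getD d

-- f-string formatting of a value that is either a string or None
def pvFmt (v : Option String) : List Char :=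
  match v with | none => ['N','o','n','e'] | some s => s.toList

-- name = f"{c.get('first_name','')} {c.get('last_name','')}".strip() or c.get('company_name','');
-- if not name: skip (= none); else key = name.strip()
def pvKey (c : List (String × Option String)) : Option String :=
  let nm := PySem.Chars.strip (pvFmt (pvGet c "first_name" (some "")) ++ ' ' :: pvFmt (pvGet c "last_name" (some "")))
  let name : Option (List Char) :=
    if nm.isEmpty then (pvGet c "company_name" (some "")).map String.toList else some nm
  match name with
  | none => none
  | some l => if l.isEmpty then none else some (String.ofList (PySem.Chars.strip l))

-- ===== PORT A =====
-- the 10-field default record, written out literally as A's dict display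
def pvTemplate (key : String) (c : List (String × Option String)) : PySem.Dict String (Option String) :=
  PySem.Dict.mk
    [("name", some key), ("first_name", pvGet c "first_name" (some "")),
     ("last_name", pvGet c "last_name" (some "")), ("company_name", pvGet c "company_name" (some "")),
     ("customer_type", pvGet c "customer_type" (some "")), ("subscription_type", pvGet c "subscription_type" (some "")),
     ("email", pvGet c "email" none), ("phone_number", pvGet c "phone_number" (some "")),
     ("dob", pvGet c "dob" (some "")), ("sex", pvGet c "sex" (some ""))]

-- A's loop body: customers.setdefault(key, template).update(c), i.e.
-- customers[key] = (customers[key] if key present else template) updated with c = Dict.modify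
def pvStepA (cust : PySem.Dict String (PySem.Dict String (Option String)))
    (c : List (String × Option String)) : PySem.Dict String (PySem.Dict String (Option String)) :=
  match pvKey c with
  | none => cust
  | some key => cust.modify key (pvTemplate key c) (fun v => v.update c)

def transform_customers (csv_data : List (List (String × Option String))) (json_data : List (List (String × Option String))) : List (List (String × Option String)) :=
  (((csv_data ++ json_data).foldl pvStepA PySem.Dict.empty).values).map PySem.Dict.items

-- ===== PORT B =====
-- B's pass-1 loop body: groups.setdefault(key, []).append(c) = Dict.modify
def pvStepB (g : PySem.Dict String (List (List (String × Option String))))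
    (c : List (String × Option String)) : PySem.Dict String (List (List (String × Option String))) :=
  match pvKey c with
  | none => g
  | some key => g.modify key [] (fun l => l ++ [c])

-- Source B's _DEFAULTED_FIELDS table and _template: {'name': key} updated with the (f, c.get(f, d)) pairs
def pvFields : List (String × Option String) :=
  [("first_name", some ""), ("last_name", some ""), ("company_name", some ""),
   ("customer_type", some ""), ("subscription_type", some ""), ("email", none),
   ("phone_number", some ""), ("dob", some ""), ("sex", some "")]

def pvTemplateB (key : String) (c : List (String × Option String)) : PySem.Dict String (Option String) :=
  (PySem.Dict.mk [("name", some key)]).update (pvFields.map (fun fd => (fd.1, pvGet c fd.1 fd.2)))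

-- B's pass-2 body: merged = _template(key, recs[0]); for c in recs: merged.update(c)
def pvBuild (key : String) (recs : List (List (String × Option String))) : PySem.Dict String (Option String) :=
  recs.foldl (fun m c => m.update c) (pvTemplateB key (recs.headD []))

def transform_customers_alt (csv_data : List (List (String × Option String))) (json_data : List (List (String × Option String))) : List (List (String × Option String)) :=
  let groups := (csv_data ++ json_data).foldl pvStepB PySem.Dict.empty
  groups.items.map (fun p => (pvBuild p.1 p.2).items)

-- ===== PRECONDITION & SPEC =====
def Spec_transform_customers (csv_data : List (List (String × Option String))) (json_data : List (List (String × Option String))) (out : List (List (String × Option String))) : Prop := out = transform_customers_alt csv_data json_data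
instance (csv_data : List (List (String × Option String))) (json_data : List (List (String × Option String))) (out : List (List (String × Option String))) : Decidable (Spec_transform_customers csv_data json_data out) := by unfold Spec_transform_customers; infer_instance

-- ===== CLAIM (what is proved, stated in full; the proofs are below) =====
def Claim_equal_transform_customers : Prop := ∀ (csv_data : List (List (String × Option String))) (json_data : List (List (String × Option String))), Dom_transform_customers csv_data json_data → Spec_transform_customers csv_data json_data (transform_customers csv_data json_data)

-- ===== LEMMAS AND PROOFS =====
-- B's table-built template is A's literal template
set_option maxHeartbeats 1000000 in
theorem pvTemplateB_eq (key : String) (c : List (String × Option String)) :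
    pvTemplateB key c = pvTemplate key c := by
  rfl

-- pvMapVal g reconstructs A's accumulated customers dict from B's groups dict
def pvMapVal (g : PySem.Dict String (List (List (String × Option String)))) :
    PySem.Dict String (PySem.Dict String (Option String)) :=
  PySem.Dict.mk (g.items.map (fun p => (p.1, pvBuild p.1 p.2)))

theorem pv_get?_mapVal (g : PySem.Dict String (List (List (String × Option String)))) (k : String) :
    (pvMapVal g).get? k = (g.get? k).map (pvBuild k) := by
  obtain ⟨l⟩ := g
  induction l with
  | nil => rfl
  | cons p t ih =>
    obtain ⟨k', v⟩ := p
    simp only [pvMapVal, List.map_cons, PySem.Dict.get?_mk_cons]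
    by_cases h : k' == k
    · simp [eq_of_beq h]
    · simp only [h, Bool.false_eq_true, if_false]
      simpa only [pvMapVal] using ih

theorem pv_contains_mapVal (g : PySem.Dict String (List (List (String × Option String)))) (k : String) :
    (pvMapVal g).contains k = g.contains k := by
  rw [PySem.Dict.contains_eq_isSome_get?, PySem.Dict.contains_eq_isSome_get?, pv_get?_mapVal]
  cases g.get? k <;> rfl

theorem pv_step_comm (g : PySem.Dict String (List (List (String × Option String))))
    (c : List (String × Option String)) (hne : ∀ p ∈ g.items, p.2 ≠ []) :
    pvStepA (pvMapVal g) c = pvMapVal (pvStepB g c) := by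
  cases hk : pvKey c with
  | none => simp [pvStepA, pvStepB, hk]
  | some k =>
    simp only [pvStepA, pvStepB, hk, PySem.Dict.modify]
    cases hg : g.get? k with
    | none =>
      have hc : g.contains k = false := by
        rw [PySem.Dict.contains_eq_isSome_get?, hg]; rfl
      have hc' : (pvMapVal g).contains k = false := by rw [pv_contains_mapVal]; exact hc
      apply PySem.Dict.ext
      show (PySem.Dict.insert _ _ _).items = ((g.insert k _).items).map _
      rw [PySem.Dict.items_insert, PySem.Dict.items_insert]
      simp only [hc, hc', Bool.false_eq_true, if_false]
      rw [PySem.Dict.getD_of_not_contains _ _ hc', PySem.Dict.getD_of_not_contains _ _ hc]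
      simp [pvMapVal, pvBuild, pvTemplateB_eq]
    | some recs =>
      have hmem : (k, recs) ∈ g.items := PySem.Dict.mem_items_of_get?_eq_some g hg
      have hrecs : recs ≠ [] := hne _ hmem
      have hc : g.contains k = true := by
        rw [PySem.Dict.contains_eq_isSome_get?, hg]; rfl
      have hc' : (pvMapVal g).contains k = true := by rw [pv_contains_mapVal]; exact hc
      have hgD : g.getD k [] = recs := PySem.Dict.getD_of_get?_eq_some g [] hg
      have hgD' : (pvMapVal g).getD k (pvTemplate k c) = pvBuild k recs := by
        rw [PySem.Dict.getD_eq_get?_getD, pv_get?_mapVal, hg]; rfl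
      apply PySem.Dict.ext
      show (PySem.Dict.insert _ _ _).items = ((g.insert k _).items).map _
      rw [PySem.Dict.items_insert, PySem.Dict.items_insert]
      simp only [hc, hc', if_true, hgD, hgD']
      show (g.items.map (fun p => (p.1, pvBuild p.1 p.2))).map _ = PySem.Dict.items (pvMapVal _)
      simp only [pvMapVal, List.map_map]
      apply List.map_congr_left
      intro p hp
      by_cases h : p.1 == k
      · simp only [Function.comp, h, if_true]
        have : pvBuild k (recs ++ [c]) = (pvBuild k recs).update c := by
          simp [pvBuild, List.foldl_append, List.headD_eq_head?_getD, List.head?_append_of_ne_nil _ hrecs]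
        simp [this]
      · simp [Function.comp, h]

theorem pv_inv_stepB (g : PySem.Dict String (List (List (String × Option String))))
    (c : List (String × Option String)) (hne : ∀ p ∈ g.items, p.2 ≠ []) :
    ∀ p ∈ (pvStepB g c).items, p.2 ≠ [] := by
  cases hk : pvKey c with
  | none => simpa [pvStepB, hk] using hne
  | some k =>
    simp only [pvStepB, hk, PySem.Dict.modify]
    intro p hp
    rcases (PySem.Dict.mem_items_insert _ _ _ _).1 hp with h | ⟨h, _⟩
    · subst h; simp
    · exact hne _ h

theorem pv_fold_comm (L : List (List (String × Option String)))
    (g : PySem.Dict String (List (List (String × Option String)))) (hne : ∀ p ∈ g.items, p.2 ≠ []) :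
    L.foldl pvStepA (pvMapVal g) = pvMapVal (L.foldl pvStepB g) := by
  induction L generalizing g with
  | nil => rfl
  | cons c t ih =>
    simp only [List.foldl_cons]
    rw [pv_step_comm g c hne]
    exact ih _ (pv_inv_stepB g c hne)

theorem pv_main (csv_data json_data : List (List (String × Option String))) :
    transform_customers csv_data json_data = transform_customers_alt csv_data json_data := by
  unfold transform_customers transform_customers_alt
  have h0 : (PySem.Dict.empty : PySem.Dict String (PySem.Dict String (Option String))) = pvMapVal PySem.Dict.empty := rfl
  rw [h0, pv_fold_comm _ _ (by intro p hp; cases hp)]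
  simp [pvMapVal, PySem.Dict.values, List.map_map, Function.comp]

-- ===== VERDICT (by name: the statement is the Claim_ definition above) =====
theorem transform_customers_spec : Claim_equal_transform_customers := by
  intro csv_data json_data _
  show transform_customers csv_data json_data = transform_customers_alt csv_data json_data
  exact pv_main csv_data json_data
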